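-- pv_equiv track=rewrite | github.com/lee-alt-add/Daily-Practice | Python Katas/Kata_04/Kata_02/python_practice.py | star_conversion
-- ===== SOURCE A (Python) =====
-- def star_conversion(word, index):
--     """Create a program that will turn the letter at the entered index into an asterisk.
--
--     e.g.The given word: lovely
--         The given index: 3
--
--         The program must return: lo*ely
--
--     Args:
--         word (string): The word to be iterated
--         index (int): The index to be replaced
--     """
--     result =""
--     for idx, letter in enumerate(word, start=1):
--         if idx == index:
--              result += "*"
--         else:
--             result += letter
--
--     return result
-- ===== SOURCE B (Python) =====
-- def star_conversion(word, index):
--     if 1 <= index <= len(word):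
--         return word[:index - 1] + "*" + word[index:]
--     return word
-- ===== Notes on version B (the rewrite author's own statement) =====
-- stated objective: idiomatic
-- what changed: Replaces the char-by-char accumulating loop with a closed-form two-slice concatenation guarded by a range check (measured faster: no per-character string appends).
import Mathlib
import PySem

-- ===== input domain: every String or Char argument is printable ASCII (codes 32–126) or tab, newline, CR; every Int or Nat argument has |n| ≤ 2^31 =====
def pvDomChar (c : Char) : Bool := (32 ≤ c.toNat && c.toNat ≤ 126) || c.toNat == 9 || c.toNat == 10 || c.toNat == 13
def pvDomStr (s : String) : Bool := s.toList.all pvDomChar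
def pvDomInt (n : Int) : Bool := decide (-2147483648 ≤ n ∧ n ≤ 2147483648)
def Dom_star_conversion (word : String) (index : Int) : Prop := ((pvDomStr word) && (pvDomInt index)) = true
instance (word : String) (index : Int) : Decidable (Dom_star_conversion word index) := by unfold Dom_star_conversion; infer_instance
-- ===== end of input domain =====

-- B replaces A's char-by-char accumulating loop with a guarded two-slice concatenation (idiomatic; return value only, no mutation).

-- ===== PORT A =====
-- result = ""; for idx, letter in enumerate(word, start=1): result += "*" if idx == index else letter
def star_conversion (word : String) (index : Int) : String :=
  String.ofList <|
    (PySem.List.enumerate word.toList 1).foldl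
      (fun result p => result ++ [if p.1 = index then '*' else p.2]) []

-- ===== PORT B =====
-- if 1 <= index <= len(word): word[:index-1] + "*" + word[index:] else word
def star_conversion_alt (word : String) (index : Int) : String :=
  if 1 ≤ index ∧ index ≤ (word.toList.length : Int) then
    String.ofList
      (PySem.List.slice word.toList none (some (index - 1)) ++ ['*'] ++
       PySem.List.slice word.toList (some index) none)
  else word

-- ===== PRECONDITION & SPEC =====
def Spec_star_conversion (word : String) (index : Int) (out : String) : Prop := out = star_conversion_alt word index
instance (word : String) (index : Int) (out : String) : Decidable (Spec_star_conversion word index out) := by unfold Spec_star_conversion; infer_instance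

-- ===== CLAIM (what is proved, stated in full; the proofs are below) =====
def Claim_equal_star_conversion : Prop := ∀ (word : String) (index : Int), Dom_star_conversion word index → Spec_star_conversion word index (star_conversion word index)

-- ===== LEMMAS AND PROOFS =====

-- A's loop over enumerate(cs, s) yields either the spliced list (index in range) or cs unchanged.
lemma starLoop_eq (cs : List Char) (index : Int) : ∀ (s : Int) (acc : List Char),
    (PySem.List.enumerate cs s).foldl
      (fun result p => result ++ [if p.1 = index then '*' else p.2]) acc
    = acc ++ (if s ≤ index ∧ index < s + cs.length then
        cs.take (index - s).toNat ++ '*' :: cs.drop ((index - s).toNat + 1) else cs) := by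
  induction cs with
  | nil =>
    intro s acc
    simp [PySem.List.enumerate_nil]
  | cons c cs ih =>
    intro s acc
    rw [PySem.List.enumerate_cons, List.foldl_cons, ih]
    by_cases hs : s = index
    · have h1 : ¬ (s + 1 ≤ index ∧ index < s + 1 + cs.length) := by omega
      have h2 : s ≤ index ∧ index < s + (c :: cs).length := by
        simp only [List.length_cons]; push_cast; omega
      have h0 : (index - s).toNat = 0 := by omega
      rw [if_neg h1, if_pos h2]
      simp [hs.symm]
    · by_cases hin : s + 1 ≤ index ∧ index < s + 1 + cs.length
      · have h2 : s ≤ index ∧ index < s + (c :: cs).length := by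
          simp only [List.length_cons]; push_cast; omega
        have hk : (index - s).toNat = (index - (s + 1)).toNat + 1 := by omega
        rw [if_pos hin, if_pos h2, hk]
        simp [hs, List.append_assoc]
      · have h2 : ¬ (s ≤ index ∧ index < s + (c :: cs).length) := by
          simp only [List.length_cons]; push_cast; omega
        rw [if_neg hin, if_neg h2]
        simp [hs]

lemma star_conversion_eq_alt (word : String) (index : Int) :
    star_conversion word index = star_conversion_alt word index := by
  unfold star_conversion star_conversion_alt
  rw [starLoop_eq]
  by_cases h : 1 ≤ index ∧ index ≤ (word.toList.length : Int)
  · have h1 : (1 : Int) ≤ index ∧ index < 1 + word.toList.length := by omega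
    rw [if_pos h1, if_pos h, PySem.List.slice_to word.toList (by omega), PySem.List.slice_from word.toList (by omega),
      List.nil_append]
    have hd : ((index - 1).toNat + 1) = index.toNat := by omega
    rw [hd]
    congr 1
    simp [List.append_assoc]
  · have h1 : ¬ ((1 : Int) ≤ index ∧ index < 1 + word.toList.length) := by omega
    rw [if_neg h1, if_neg h, List.nil_append, String.ofList_toList]

-- ===== VERDICT (by name: the statement is the Claim_ definition above) =====
theorem star_conversion_spec : Claim_equal_star_conversion := by
  intro word index _
  exact star_conversion_eq_alt word index
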